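-- pv_equiv track=rewrite | github.com/m1chaelv/COSC-1336 | Lab06.py | ratings
-- ===== SOURCE A (Python) =====
-- def report_starter(title):
--     # local variables
--     temp_report=''
--
--     # generate header in upper case and underlined
--     temp_report+='\n'
--     temp_report+=title.upper()
--     temp_report+='\n'
--     temp_report+='-'*len(title)
--     temp_report+='\n'
--
--     # return header for report
--     return(temp_report)
--
-- def ratings(temp_dict):
--     # temp_dict=rating
--     # local variables
--     title='Restaurants by Ratings'
--     temp_report=report_starter(title)
--     max_rate=4
--
--     # loop through all star ratings
--     for k1 in range(max_rate):
--         # adjust loop variable +1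
--         k1+=1
--         # add sub-heading to report "# Star Rating"
--         temp_report+=(f'{k1} Star Rating\n')
--         # Dictionary Comprehension if value== the star rating
--         temp_answer={k:v for k,v in temp_dict.items() if v==k1}
--         # generate report detail in alpha order
--         for k2 in sorted(temp_answer):
--             temp_report+=(f'\t{k2}')
--             temp_report+='\n'
--
--     # return report
--     return(temp_report)
-- ===== SOURCE B (Python) =====
-- def ratings(temp_dict):
--     # One pass groups names by star rating, then the report is emitted per bucket.
--     buckets = {}
--     for name, stars in temp_dict.items():
--         buckets.setdefault(stars, []).append(name)
--     lines = ['\nRESTAURANTS BY RATINGS\n----------------------\n']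
--     for star in (1, 2, 3, 4):
--         lines.append(f'{star} Star Rating\n')
--         for name in sorted(buckets.get(star, [])):
--             lines.append(f'\t{name}\n')
--     return ''.join(lines)
-- ===== Notes on version B (the rewrite author's own statement) =====
-- stated objective: alternative
-- what changed: B replaces A's per-rating dict-comprehension rescans (4 full passes over the dict) with a single grouping pass into rating buckets, a hard-coded header instead of report_starter, and a join of collected lines instead of repeated string +=.
import Mathlib
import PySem

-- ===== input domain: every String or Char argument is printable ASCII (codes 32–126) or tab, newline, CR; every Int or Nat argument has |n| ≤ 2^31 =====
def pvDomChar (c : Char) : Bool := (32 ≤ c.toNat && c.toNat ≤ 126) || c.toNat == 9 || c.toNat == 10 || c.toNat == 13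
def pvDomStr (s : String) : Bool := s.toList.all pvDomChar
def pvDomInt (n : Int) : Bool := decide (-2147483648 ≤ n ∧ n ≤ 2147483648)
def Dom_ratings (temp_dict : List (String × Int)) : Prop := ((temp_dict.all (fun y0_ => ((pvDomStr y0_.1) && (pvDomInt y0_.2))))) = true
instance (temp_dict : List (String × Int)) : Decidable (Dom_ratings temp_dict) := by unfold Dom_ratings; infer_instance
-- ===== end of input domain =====

-- B builds the star→names buckets in one pass and joins collected lines; A rescans the whole dict once per star rating.

-- ===== PORT A =====
def report_starter (title : String) : String :=
  let temp_report : String := ""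
  let temp_report := temp_report ++ "\n"
  let temp_report := temp_report ++ PySem.Str.upper title
  let temp_report := temp_report ++ "\n"
  let temp_report := temp_report ++ String.ofList (PySem.List.pyRepeat ['-'] (PySem.Str.len title))
  let temp_report := temp_report ++ "\n"
  temp_report

def ratings (temp_dict : List (String × Int)) : String :=
  let title := "Restaurants by Ratings"
  let temp_report := report_starter title
  let max_rate : Int := 4
  let items := (PySem.Dict.ofList temp_dict).items
  (PySem.List.pyRange 0 max_rate 1).foldl (fun temp_report k1 =>
    let k1 := k1 + 1
    let temp_report := temp_report ++ (PySem.Int.toStr k1 ++ " Star Rating\n")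
    let temp_answer := items.filter (fun kv => kv.2 == k1)
    (PySem.List.sorted (temp_answer.map (fun kv => kv.1)) (fun x => x) false).foldl
      (fun temp_report k2 => (temp_report ++ ("\t" ++ k2)) ++ "\n") temp_report) temp_report

-- ===== PORT B =====
def ratings_alt (temp_dict : List (String × Int)) : String :=
  let items := (PySem.Dict.ofList temp_dict).items
  let buckets := items.foldl
    (fun d kv => d.modify kv.2 [] (fun b => b ++ [kv.1])) (PySem.Dict.empty : PySem.Dict Int (List String))
  let lines : List String := ["\nRESTAURANTS BY RATINGS\n----------------------\n"]
  let lines := ([1, 2, 3, 4] : List Int).foldl (fun ls star =>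
    (ls ++ [PySem.Int.toStr star ++ " Star Rating\n"]) ++
      (PySem.List.sorted (buckets.getD star []) (fun x => x) false).map
        (fun name => "\t" ++ name ++ "\n")) lines
  PySem.Str.join "" lines

-- ===== PRECONDITION & SPEC =====
def Spec_ratings (temp_dict : List (String × Int)) (out : String) : Prop := out = ratings_alt temp_dict
instance (temp_dict : List (String × Int)) (out : String) : Decidable (Spec_ratings temp_dict out) := by unfold Spec_ratings; infer_instance

-- ===== CLAIM (what is proved, stated in full; the proofs are below) =====
def Claim_equal_ratings : Prop := ∀ (temp_dict : List (String × Int)), Dom_ratings temp_dict → Spec_ratings temp_dict (ratings temp_dict)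

-- ===== LEMMAS AND PROOFS =====

-- the one-pass buckets hold exactly what A's per-rating filter collects
theorem bucket_getD (l : List (String × Int)) (s : Int) :
    (l.foldl (fun d kv => d.modify kv.2 [] (fun b => b ++ [kv.1]))
      (PySem.Dict.empty : PySem.Dict Int (List String))).getD s []
    = (l.filter (fun kv => kv.2 == s)).map (fun kv => kv.1) := by
  have h := PySem.Dict.getD_foldl_modify_append (l.map (fun kv => (kv.2, kv.1)))
    (PySem.Dict.empty : PySem.Dict Int (List String)) s
  simpa [List.foldl_map, List.filter_map, List.map_map, Function.comp] using h

theorem sjoin_cons (a : String) (L : List String) :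
    PySem.Str.join "" (a :: L) = a ++ PySem.Str.join "" L := by
  cases L with
  | nil => simp [PySem.Str.join, PySem.Chars.join_singleton, PySem.Chars.join_nil]
  | cons b M => simp [PySem.Str.join, PySem.Chars.join_cons_cons]

theorem sjoin_nil : PySem.Str.join "" ([] : List String) = "" := by
  simp [PySem.Str.join, PySem.Chars.join_nil]

theorem sjoin_append (X Y : List String) :
    PySem.Str.join "" (X ++ Y) = PySem.Str.join "" X ++ PySem.Str.join "" Y := by
  induction X with
  | nil => simp [sjoin_nil]
  | cons a X ih => simp [sjoin_cons, ih, String.append_assoc]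

theorem foldl_emit (L : List String) (r : String) :
    L.foldl (fun a k2 => (a ++ ("\t" ++ k2)) ++ "\n") r
    = r ++ PySem.Str.join "" (L.map (fun k2 => "\t" ++ k2 ++ "\n")) := by
  induction L generalizing r with
  | nil => simp [sjoin_nil]
  | cons a L ih =>
    simp only [List.foldl_cons, List.map_cons]
    rw [ih, sjoin_cons]
    simp [String.append_assoc]

-- ===== VERDICT (by name: the statement is the Claim_ definition above) =====
theorem ratings_spec : Claim_equal_ratings := by
  intro temp_dict _
  show ratings temp_dict = ratings_alt temp_dict
  unfold ratings ratings_alt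
  have hrange : PySem.List.pyRange 0 4 1 = [0, 1, 2, 3] := by decide
  have hhdr : report_starter "Restaurants by Ratings"
      = "\nRESTAURANTS BY RATINGS\n----------------------\n" := by decide
  simp only [hrange, hhdr, List.foldl, bucket_getD, foldl_emit, sjoin_append, sjoin_cons,
    sjoin_nil]
  norm_num [String.append_assoc]
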